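-- pv_equiv track=rewrite | github.com/tenstorrent/tt-llk | tests/python_tests/helpers/dimensions.py | generate_matmul_dimension_combinations
-- ===== SOURCE A (Python) =====
-- from typing import List
--
-- def generate_matmul_dimension_combinations(max_tiles: int) -> List[tuple]:
--     """
--     Generate all valid matrix multiplication dimension combinations.
--
--     Creates all possible combinations of (inputA_dimensions, inputB_dimensions) where:
--     - Each input matrix has at most max_tiles tiles (each tile is 32×32)
--     - The result matrix also has at most max_tiles tiles
--     - Matrix multiplication is valid: inputA[1] == inputB[0] (K dimensions match)
--     - Returns combinations that can be used for comprehensive matmul testing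
--
--     Args:
--         max_tiles: Maximum number of tiles allowed per matrix (inputs AND result)
--
--     Returns:
--         List of tuples: Each tuple contains (inputA_dimensions, inputB_dimensions)
--         where inputA_dimensions and inputB_dimensions are [rows, cols] lists
--
--     Example:
--         For max_tiles=4:
--         Returns combinations like:
--         ([32, 32], [32, 32])    # 1×1 tiles each, result: 1×1 = 1 tile
--         ([32, 64], [64, 32])    # 1×2 and 2×1 tiles, result: 1×1 = 1 tile
--         ([64, 64], [64, 64])    # 2×2 tiles each, result: 2×2 = 4 tiles
--         ([32, 128], [128, 32])  # 1×4 and 4×1 tiles, result: 1×1 = 1 tile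
--
--         But NOT ([256, 32], [32, 256]) because result would be 8×8 = 64 tiles > 4
--     """
--
--     def generate_all_matrix_dimensions(max_tiles: int) -> List[List[int]]:
--         """Generate all possible matrix dimensions up to max_tiles."""
--         dimensions = []
--
--         # Generate all combinations of (row_tiles, col_tiles) where product <= max_tiles
--         for row_tiles in range(1, max_tiles + 1):
--             for col_tiles in range(1, max_tiles + 1):
--                 if row_tiles * col_tiles <= max_tiles:
--                     rows = row_tiles * 32
--                     cols = col_tiles * 32
--                     dimensions.append([rows, cols])
--
--         return dimensions
--
--     # Generate all possible matrix dimensions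
--     all_dimensions = generate_all_matrix_dimensions(max_tiles)
--
--     # Find all valid matmul combinations
--     valid_combinations = []
--
--     for inputA_dims in all_dimensions:
--         for inputB_dims in all_dimensions:
--             # Check if matrices are compatible for multiplication: A[M,K] × B[K,N]
--             if inputA_dims[1] == inputB_dims[0]:  # K dimensions must match
--
--                 # Calculate result matrix dimensions and tile count
--                 M = inputA_dims[0]  # Rows in A
--                 K = inputA_dims[1]  # Cols in A (= Rows in B)
--                 N = inputB_dims[1]  # Cols in B
--
--                 # Result matrix C will be [M, N]
--                 result_tiles = (M // 32) * (N // 32)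
--
--                 # Only include if result matrix also fits within max_tiles
--                 if result_tiles <= max_tiles:
--                     valid_combinations.append((inputA_dims, inputB_dims))
--
--     return valid_combinations
-- ===== SOURCE B (Python) =====
-- from typing import List
--
--
-- def generate_matmul_dimension_combinations(max_tiles: int) -> List[tuple]:
--     # Direct enumeration over tile counts (m, k, n): no intermediate dimension
--     # list and no quadratic pairing scan; only valid combinations are visited.
--     combinations = []
--     for m in range(1, max_tiles + 1):
--         for k in range(1, max_tiles // m + 1):
--             n_limit = min(max_tiles // k, max_tiles // m)
--             for n in range(1, n_limit + 1):
--                 combinations.append(([m * 32, k * 32], [k * 32, n * 32]))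
--     return combinations
-- ===== Notes on version B (the rewrite author's own statement) =====
-- stated objective: faster
-- what changed: Instead of materialising the list of all dimensions and pairing every A-matrix with every B-matrix in a quadratic scan with a K-match test, B enumerates tile counts (m, k, n) directly with the inner ranges bounded by max_tiles//m and min(max_tiles//k, max_tiles//m), so only valid combinations are ever visited.
import Mathlib
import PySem

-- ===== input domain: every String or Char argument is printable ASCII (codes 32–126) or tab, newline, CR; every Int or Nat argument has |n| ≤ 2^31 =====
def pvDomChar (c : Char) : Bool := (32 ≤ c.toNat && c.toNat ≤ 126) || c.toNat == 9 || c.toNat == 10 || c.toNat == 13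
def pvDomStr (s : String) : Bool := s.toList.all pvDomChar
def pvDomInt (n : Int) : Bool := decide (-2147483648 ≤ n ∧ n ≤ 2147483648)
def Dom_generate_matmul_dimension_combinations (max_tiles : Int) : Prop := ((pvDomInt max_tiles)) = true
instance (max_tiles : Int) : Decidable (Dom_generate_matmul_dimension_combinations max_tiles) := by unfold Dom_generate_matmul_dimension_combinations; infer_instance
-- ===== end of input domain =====

-- B replaces A's quadratic pairing scan over a materialised dimension list by a direct
-- enumeration of tile counts (m, k, n) with tight range bounds (objective: faster).

-- ===== PORT A =====
-- helper: the nested loop of A's inner function generate_all_matrix_dimensions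
def pvAllDims (max_tiles : Int) : List (List Int) :=
  (PySem.List.pyRange 1 (max_tiles + 1)).foldl (fun dims row_tiles =>
    (PySem.List.pyRange 1 (max_tiles + 1)).foldl (fun dims col_tiles =>
      if row_tiles * col_tiles ≤ max_tiles then
        dims ++ [[row_tiles * 32, col_tiles * 32]]
      else dims) dims) []

-- indexing dims[0] / dims[1] is ported with pyGetD (default 0); every element of
-- pvAllDims is a two-element list, so the default is never read and the port is exact
def generate_matmul_dimension_combinations (max_tiles : Int) : List (List Int × List Int) :=
  let all_dimensions := pvAllDims max_tiles
  all_dimensions.foldl (fun acc inputA_dims =>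
    all_dimensions.foldl (fun acc inputB_dims =>
      if PySem.List.pyGetD inputA_dims 1 0 = PySem.List.pyGetD inputB_dims 0 0 then
        if PySem.Int.floordiv (PySem.List.pyGetD inputA_dims 0 0) 32
            * PySem.Int.floordiv (PySem.List.pyGetD inputB_dims 1 0) 32 ≤ max_tiles then
          acc ++ [(inputA_dims, inputB_dims)]
        else acc
      else acc) acc) []

-- ===== PORT B =====
def generate_matmul_dimension_combinations_alt (max_tiles : Int) : List (List Int × List Int) :=
  (PySem.List.pyRange 1 (max_tiles + 1)).foldl (fun acc m =>
    (PySem.List.pyRange 1 (PySem.Int.floordiv max_tiles m + 1)).foldl (fun acc k =>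
      let n_limit := min (PySem.Int.floordiv max_tiles k) (PySem.Int.floordiv max_tiles m)
      (PySem.List.pyRange 1 (n_limit + 1)).foldl (fun acc n =>
        acc ++ [([m * 32, k * 32], [k * 32, n * 32])]) acc) acc) []

-- ===== PRECONDITION & SPEC =====
def Spec_generate_matmul_dimension_combinations (max_tiles : Int) (out : List (List Int × List Int)) : Prop := out = generate_matmul_dimension_combinations_alt max_tiles
instance (max_tiles : Int) (out : List (List Int × List Int)) : Decidable (Spec_generate_matmul_dimension_combinations max_tiles out) := by unfold Spec_generate_matmul_dimension_combinations; infer_instance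

-- ===== CLAIM (what is proved, stated in full; the proofs are below) =====
def Claim_equal_generate_matmul_dimension_combinations : Prop := ∀ (max_tiles : Int), Dom_generate_matmul_dimension_combinations max_tiles → Spec_generate_matmul_dimension_combinations max_tiles (generate_matmul_dimension_combinations max_tiles)

-- ===== LEMMAS AND PROOFS =====

-- abbreviations used only by the proofs
def pvR (n : Int) : List Int := PySem.List.pyRange 1 (n + 1)
def pvFD (a b : Int) : Int := PySem.Int.floordiv a b

-- the common flatMap normal form both ports are reduced to
def pvNormal (mx : Int) : List (List Int × List Int) :=
  (pvR mx).flatMap (fun m => (pvR (pvFD mx m)).flatMap (fun k =>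
    (pvR (min (pvFD mx k) (pvFD mx m))).map
      (fun n => (([m * 32, k * 32] : List Int), ([k * 32, n * 32] : List Int)))))

theorem pvFD_mul32 (x : Int) : PySem.Int.floordiv (x * 32) 32 = x := by
  rw [PySem.Int.floordiv_eq_ediv_of_pos (by norm_num)]
  exact Int.mul_ediv_cancel x (by norm_num)

theorem pvFD_nonneg {a b : Int} (ha : 0 ≤ a) (hb : 0 < b) : 0 ≤ pvFD a b := by
  rw [pvFD, PySem.Int.floordiv_eq_ediv_of_pos hb]
  exact Int.ediv_nonneg ha (le_of_lt hb)

theorem pvFD_le_self {a b : Int} (ha : 0 ≤ a) (hb : 0 < b) : pvFD a b ≤ a := by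
  rw [pvFD, PySem.Int.floordiv_eq_ediv_of_pos hb]
  exact Int.ediv_le_self b ha

-- a filtered range 1..N with condition r*c ≤ mx is the range 1..min N (mx//r)
theorem pvFilter_mul_le (N mx r : Int) (hr : 0 < r) (hmx : 0 ≤ mx) :
    (pvR N).filter (fun c => decide (r * c ≤ mx)) = pvR (min N (pvFD mx r)) := by
  have hB : 0 ≤ pvFD mx r := pvFD_nonneg hmx hr
  have hfc : (pvR N).filter (fun c => decide (r * c ≤ mx))
      = (pvR N).filter (fun c => decide (c ≤ pvFD mx r)) := by
    apply List.filter_congr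
    intro x _
    simp only [decide_eq_decide]
    rw [pvFD, PySem.Int.le_floordiv_iff_mul_le hr, mul_comm]
  rw [hfc]
  by_cases h : N ≤ pvFD mx r
  · rw [min_eq_left h]
    apply List.filter_eq_self.mpr
    intro a ha
    have := PySem.List.mem_pyRange_one.mp ha
    simp only [decide_eq_true_eq]
    omega
  · rw [min_eq_right (by omega)]
    have hsplit : pvR N = pvR (pvFD mx r) ++ PySem.List.pyRange (pvFD mx r + 1) (N + 1) := by
      rw [pvR, pvR]
      exact PySem.List.pyRange_one_append 1 (pvFD mx r + 1) (N + 1) (by omega) (by omega)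
    rw [hsplit, List.filter_append]
    have h1 : (pvR (pvFD mx r)).filter (fun c => decide (c ≤ pvFD mx r)) = pvR (pvFD mx r) := by
      apply List.filter_eq_self.mpr
      intro a ha
      have := PySem.List.mem_pyRange_one.mp ha
      simp only [decide_eq_true_eq]
      omega
    have h2 : (PySem.List.pyRange (pvFD mx r + 1) (N + 1)).filter
        (fun c => decide (c ≤ pvFD mx r)) = [] := by
      apply List.filter_eq_nil_iff.mpr
      intro a ha
      have := PySem.List.mem_pyRange_one.mp ha
      simp only [decide_eq_true_eq]
      omega
    rw [h1, h2, List.append_nil]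

-- picking the unique matching block out of a flatMap over a Nodup list
theorem pvFlatMap_ite_eq {α : Type} (xs : List Int) (k : Int) (L : Int → List α)
    (hnd : xs.Nodup) (hk : k ∈ xs) :
    xs.flatMap (fun r => if r = k then L r else []) = L k := by
  induction xs with
  | nil => cases hk
  | cons x xs ih =>
    rcases List.nodup_cons.mp hnd with ⟨hx, hnd'⟩
    by_cases hxk : x = k
    · subst hxk
      have hrest : xs.flatMap (fun r => if r = x then L r else []) = [] := by
        apply List.flatMap_eq_nil_iff.mpr
        intro r hr
        have hne : r ≠ x := by rintro rfl; exact hx hr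
        simp [hne]
      simp [List.flatMap_cons, hrest]
    · have hk' : k ∈ xs := by
        rcases List.mem_cons.mp hk with h | h
        · exact absurd h.symm hxk
        · exact h
      simp only [List.flatMap_cons, if_neg hxk, List.nil_append]
      exact ih hnd' hk'

-- A's dimension generator in flatMap normal form
theorem pvAllDims_eq (mx : Int) :
    pvAllDims mx = (pvR mx).flatMap (fun r =>
      (pvR (pvFD mx r)).map (fun c => ([r * 32, c * 32] : List Int))) := by
  unfold pvAllDims
  have hstep : ∀ (acc : List (List Int)), ∀ r ∈ pvR mx,
      (PySem.List.pyRange 1 (mx + 1)).foldl (fun dims c =>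
        if r * c ≤ mx then dims ++ [[r * 32, c * 32]] else dims) acc
      = acc ++ (pvR (pvFD mx r)).map (fun c => [r * 32, c * 32]) := by
    intro acc r hr
    have hr' := PySem.List.mem_pyRange_one.mp hr
    have hbody : (PySem.List.pyRange 1 (mx + 1)).foldl (fun dims c =>
        if r * c ≤ mx then dims ++ [[r * 32, c * 32]] else dims) acc
        = (PySem.List.pyRange 1 (mx + 1)).foldl (fun dims c =>
        if decide (r * c ≤ mx) = true then dims ++ [[r * 32, c * 32]] else dims) acc := by
      apply PySem.List.foldl_congr_mem
      intro a x _
      simp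
    rw [hbody, PySem.List.foldl_append_if (fun c => decide (r * c ≤ mx))
      (fun c => ([r * 32, c * 32] : List Int))]
    have hflt := pvFilter_mul_le mx mx r (by omega) (by omega)
    have hmin : min mx (pvFD mx r) = pvFD mx r := by
      have := pvFD_le_self (a := mx) (b := r) (by omega) (by omega)
      omega
    rw [show PySem.List.pyRange 1 (mx + 1) = pvR mx from rfl, hflt, hmin]
  refine (PySem.List.foldl_congr_mem _ _
    (fun dims r => dims ++ (pvR (pvFD mx r)).map (fun c => [r * 32, c * 32])) _
    (fun acc r hr => hstep acc r hr)).trans ?_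
  rw [PySem.List.foldl_append_eq_flatMap]
  simp [pvR]

-- the piece of A's pairing loop for a fixed inputA = [m*32, k*32]
theorem pvPiece_eq (mx m k : Int) (hm : 1 ≤ m) (hmx : 0 ≤ mx) (hk : 1 ≤ k) (hkmx : k ≤ mx) :
    (((pvR mx).flatMap (fun r =>
        (pvR (pvFD mx r)).map (fun c => ([r * 32, c * 32] : List Int)))).filter
      (fun b => decide (PySem.List.pyGetD ([m * 32, k * 32] : List Int) 1 0 = PySem.List.pyGetD b 0 0)
        && decide (PySem.Int.floordiv (PySem.List.pyGetD ([m * 32, k * 32] : List Int) 0 0) 32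
            * PySem.Int.floordiv (PySem.List.pyGetD b 1 0) 32 ≤ mx))).map
      (fun b => (([m * 32, k * 32] : List Int), b))
    = (pvR (min (pvFD mx k) (pvFD mx m))).map
        (fun n => (([m * 32, k * 32] : List Int), ([k * 32, n * 32] : List Int))) := by
  rw [List.filter_flatMap]
  have hblock : ∀ r ∈ pvR mx,
      ((pvR (pvFD mx r)).map (fun c => ([r * 32, c * 32] : List Int))).filter
        (fun b => decide (PySem.List.pyGetD ([m * 32, k * 32] : List Int) 1 0 = PySem.List.pyGetD b 0 0)
          && decide (PySem.Int.floordiv (PySem.List.pyGetD ([m * 32, k * 32] : List Int) 0 0) 32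
              * PySem.Int.floordiv (PySem.List.pyGetD b 1 0) 32 ≤ mx))
      = if r = k then ((pvR (min (pvFD mx k) (pvFD mx m))).map
          (fun c => ([r * 32, c * 32] : List Int))) else [] := by
    intro r _
    rw [List.filter_map]
    have hpred : ∀ c ∈ pvR (pvFD mx r),
        ((fun b => decide (PySem.List.pyGetD ([m * 32, k * 32] : List Int) 1 0 = PySem.List.pyGetD b 0 0)
          && decide (PySem.Int.floordiv (PySem.List.pyGetD ([m * 32, k * 32] : List Int) 0 0) 32
              * PySem.Int.floordiv (PySem.List.pyGetD b 1 0) 32 ≤ mx)) ∘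
          (fun c => ([r * 32, c * 32] : List Int))) c
        = (decide (r = k) && decide (m * c ≤ mx)) := by
      intro c _
      have h1 : PySem.List.pyGetD ([m * 32, k * 32] : List Int) 1 0 = k * 32 := by
        simp [PySem.List.pyGetD, PySem.List.pyGet?, PySem.List.pyIdx?]
      have h2 : PySem.List.pyGetD ([m * 32, k * 32] : List Int) 0 0 = m * 32 := by
        simp [PySem.List.pyGetD, PySem.List.pyGet?, PySem.List.pyIdx?]
      have h3 : PySem.List.pyGetD ([r * 32, c * 32] : List Int) 0 0 = r * 32 := by
        simp [PySem.List.pyGetD, PySem.List.pyGet?, PySem.List.pyIdx?]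
      have h4 : PySem.List.pyGetD ([r * 32, c * 32] : List Int) 1 0 = c * 32 := by
        simp [PySem.List.pyGetD, PySem.List.pyGet?, PySem.List.pyIdx?]
      simp only [Function.comp, h1, h2, h3, h4, pvFD_mul32]
      have hrk : (k * 32 = r * 32) ↔ (r = k) := by omega
      simp [hrk]
    rw [List.filter_congr hpred]
    by_cases hrk : r = k
    · subst hrk
      have hdrop : (pvR (pvFD mx r)).filter (fun c => decide (r = r) && decide (m * c ≤ mx))
          = (pvR (pvFD mx r)).filter (fun c => decide (m * c ≤ mx)) := by
        apply List.filter_congr; intro x _; simp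
      rw [hdrop, pvFilter_mul_le (pvFD mx r) mx m (by omega) hmx]
      simp [min_comm]
    · have hnil : (pvR (pvFD mx r)).filter (fun c => decide (r = k) && decide (m * c ≤ mx)) = [] := by
        apply List.filter_eq_nil_iff.mpr
        intro a _
        simp [hrk]
      rw [hnil, if_neg hrk]
      simp
  rw [List.flatMap_congr hblock, pvFlatMap_ite_eq (pvR mx) k
    (fun r => (pvR (min (pvFD mx k) (pvFD mx m))).map (fun c => ([r * 32, c * 32] : List Int)))
    (PySem.List.nodup_pyRange_one 1 (mx + 1))
    (PySem.List.mem_pyRange_one.mpr ⟨hk, by omega⟩),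
    List.map_map]
  rfl

-- port A reduces to the normal form
theorem pvA_eq_normal (mx : Int) :
    generate_matmul_dimension_combinations mx = pvNormal mx := by
  unfold generate_matmul_dimension_combinations
  simp only []
  have hinner : ∀ (acc : List (List Int × List Int)) (a : List Int),
      (pvAllDims mx).foldl (fun acc b =>
        if PySem.List.pyGetD a 1 0 = PySem.List.pyGetD b 0 0 then
          if PySem.Int.floordiv (PySem.List.pyGetD a 0 0) 32
              * PySem.Int.floordiv (PySem.List.pyGetD b 1 0) 32 ≤ mx then
            acc ++ [(a, b)]
          else acc
        else acc) acc
      = acc ++ ((pvAllDims mx).filter (fun b =>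
          decide (PySem.List.pyGetD a 1 0 = PySem.List.pyGetD b 0 0)
          && decide (PySem.Int.floordiv (PySem.List.pyGetD a 0 0) 32
              * PySem.Int.floordiv (PySem.List.pyGetD b 1 0) 32 ≤ mx))).map (fun b => (a, b)) := by
    intro acc a
    have hbody : (pvAllDims mx).foldl (fun acc b =>
        if PySem.List.pyGetD a 1 0 = PySem.List.pyGetD b 0 0 then
          if PySem.Int.floordiv (PySem.List.pyGetD a 0 0) 32
              * PySem.Int.floordiv (PySem.List.pyGetD b 1 0) 32 ≤ mx then
            acc ++ [(a, b)]
          else acc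
        else acc) acc
        = (pvAllDims mx).foldl (fun acc b =>
          if (decide (PySem.List.pyGetD a 1 0 = PySem.List.pyGetD b 0 0)
            && decide (PySem.Int.floordiv (PySem.List.pyGetD a 0 0) 32
              * PySem.Int.floordiv (PySem.List.pyGetD b 1 0) 32 ≤ mx)) = true then
            acc ++ [(a, b)]
          else acc) acc := by
      apply PySem.List.foldl_congr_mem
      intro acc' b _
      by_cases h1 : PySem.List.pyGetD a 1 0 = PySem.List.pyGetD b 0 0
      · by_cases h2 : PySem.Int.floordiv (PySem.List.pyGetD a 0 0) 32
            * PySem.Int.floordiv (PySem.List.pyGetD b 1 0) 32 ≤ mx <;>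
          simp [h1, h2]
      · simp [h1]
    rw [hbody, PySem.List.foldl_append_if _ (fun b => (a, b))]
  refine (PySem.List.foldl_congr_mem _ _
    (fun acc a => acc ++ ((pvAllDims mx).filter (fun b =>
      decide (PySem.List.pyGetD a 1 0 = PySem.List.pyGetD b 0 0)
      && decide (PySem.Int.floordiv (PySem.List.pyGetD a 0 0) 32
          * PySem.Int.floordiv (PySem.List.pyGetD b 1 0) 32 ≤ mx))).map (fun b => (a, b))) _
    (fun acc a _ => hinner acc a)).trans ?_
  rw [PySem.List.foldl_append_eq_flatMap, List.nil_append]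
  rw [show pvAllDims mx = (pvR mx).flatMap (fun r =>
    (pvR (pvFD mx r)).map (fun c => ([r * 32, c * 32] : List Int))) from pvAllDims_eq mx]
  rw [List.flatMap_assoc]
  unfold pvNormal
  apply List.flatMap_congr
  intro m hm
  have hm' := PySem.List.mem_pyRange_one.mp hm
  rw [List.flatMap_map]
  apply List.flatMap_congr
  intro k hkmem
  have hk' := PySem.List.mem_pyRange_one.mp hkmem
  have hmx : (0:Int) ≤ mx := by omega
  have hkmx : k ≤ mx := by
    have := pvFD_le_self (a := mx) (b := m) hmx (by omega)
    omega
  exact pvPiece_eq mx m k (by omega) hmx (by omega) hkmx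

-- port B reduces to the normal form
theorem pvB_eq_normal (mx : Int) :
    generate_matmul_dimension_combinations_alt mx = pvNormal mx := by
  unfold generate_matmul_dimension_combinations_alt
  have hmid : ∀ (acc : List (List Int × List Int)) (m : Int),
      (PySem.List.pyRange 1 (PySem.Int.floordiv mx m + 1)).foldl (fun acc k =>
        (PySem.List.pyRange 1 (min (PySem.Int.floordiv mx k) (PySem.Int.floordiv mx m) + 1)).foldl
          (fun acc n => acc ++ [([m * 32, k * 32], [k * 32, n * 32])]) acc) acc
      = acc ++ (pvR (pvFD mx m)).flatMap (fun k =>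
          (pvR (min (pvFD mx k) (pvFD mx m))).map
            (fun n => (([m * 32, k * 32] : List Int), ([k * 32, n * 32] : List Int)))) := by
    intro acc m
    have hin : ∀ (acc' : List (List Int × List Int)), ∀ k ∈ pvR (pvFD mx m),
        (PySem.List.pyRange 1 (min (PySem.Int.floordiv mx k) (PySem.Int.floordiv mx m) + 1)).foldl
          (fun acc n => acc ++ [([m * 32, k * 32], [k * 32, n * 32])]) acc'
        = acc' ++ (pvR (min (pvFD mx k) (pvFD mx m))).map
            (fun n => (([m * 32, k * 32] : List Int), ([k * 32, n * 32] : List Int))) := by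
      intro acc' k _
      exact PySem.List.foldl_append_singleton_eq_map
        (fun n => (([m * 32, k * 32] : List Int), ([k * 32, n * 32] : List Int))) _ acc'
    refine (PySem.List.foldl_congr_mem _ _
      (fun acc' k => acc' ++ (pvR (min (pvFD mx k) (pvFD mx m))).map
        (fun n => (([m * 32, k * 32] : List Int), ([k * 32, n * 32] : List Int)))) _
      (fun acc' k hk => hin acc' k hk)).trans ?_
    rw [PySem.List.foldl_append_eq_flatMap]
  refine (PySem.List.foldl_congr_mem _ _
    (fun acc m => acc ++ (pvR (pvFD mx m)).flatMap (fun k =>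
      (pvR (min (pvFD mx k) (pvFD mx m))).map
        (fun n => (([m * 32, k * 32] : List Int), ([k * 32, n * 32] : List Int))))) _
    (fun acc m _ => hmid acc m)).trans ?_
  rw [PySem.List.foldl_append_eq_flatMap, List.nil_append]
  rfl

-- ===== VERDICT (by name: the statement is the Claim_ definition above) =====
theorem generate_matmul_dimension_combinations_spec : Claim_equal_generate_matmul_dimension_combinations := by
  intro mx _
  unfold Spec_generate_matmul_dimension_combinations
  rw [pvA_eq_normal, pvB_eq_normal]
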